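-- pv_equiv track=rewrite | github.com/richardslab/EXWAS_pipeline | python_scripts/python_helpers/vep_helpers/parse_vep.py | __parse_mutationtaster
-- ===== SOURCE A (Python) =====
-- def __parse_mutationtaster(consequence,consequence_elem,MUTATIONTASTER_ORDER):
--   mutationtaster_preds = [x.upper().strip() for x in consequence_elem[1].split(",")]
--   mutationtaster_preds = [x for x in mutationtaster_preds if x!='.']
--   if len(mutationtaster_preds) == 0:
--     return None
--   assert(
--     all(
--       [x in MUTATIONTASTER_ORDER for x in mutationtaster_preds]
--     )
--   ),f"invalid EVE class25 pred {consequence}"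
--   for i in MUTATIONTASTER_ORDER:
--     if i in mutationtaster_preds:
--       return i
--   assert(False)
-- ===== SOURCE B (Python) =====
-- def __parse_mutationtaster(consequence, consequence_elem, MUTATIONTASTER_ORDER):
--   mutationtaster_preds = [x.upper().strip() for x in consequence_elem[1].split(",")]
--   mutationtaster_preds = [x for x in mutationtaster_preds if x != '.']
--   if not mutationtaster_preds:
--     return None
--   assert(
--     all(
--       [x in MUTATIONTASTER_ORDER for x in mutationtaster_preds]
--     )
--   ), f"invalid EVE class25 pred {consequence}"
--   return min(mutationtaster_preds, key=MUTATIONTASTER_ORDER.index)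
-- ===== Notes on version B (the rewrite author's own statement) =====
-- stated objective: idiomatic
-- what changed: The selection loop over MUTATIONTASTER_ORDER testing membership in the parsed predictions is replaced by min(preds, key=MUTATIONTASTER_ORDER.index), folding once over the predictions ranked by their position in the order list; parsing and the assert are unchanged.
import Mathlib
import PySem

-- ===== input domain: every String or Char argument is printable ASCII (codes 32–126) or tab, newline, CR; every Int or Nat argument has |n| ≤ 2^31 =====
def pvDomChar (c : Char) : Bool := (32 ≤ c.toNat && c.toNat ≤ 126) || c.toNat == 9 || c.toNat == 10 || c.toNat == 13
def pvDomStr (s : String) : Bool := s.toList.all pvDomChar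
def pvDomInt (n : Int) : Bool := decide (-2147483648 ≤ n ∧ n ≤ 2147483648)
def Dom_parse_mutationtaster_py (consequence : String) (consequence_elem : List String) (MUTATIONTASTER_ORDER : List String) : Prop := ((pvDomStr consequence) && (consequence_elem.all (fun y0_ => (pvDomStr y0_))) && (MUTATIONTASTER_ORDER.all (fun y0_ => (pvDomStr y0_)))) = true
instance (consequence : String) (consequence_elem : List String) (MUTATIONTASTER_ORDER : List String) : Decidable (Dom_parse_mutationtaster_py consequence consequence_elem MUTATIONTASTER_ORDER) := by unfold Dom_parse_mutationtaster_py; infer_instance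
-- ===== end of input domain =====

-- B replaces A's scan over MUTATIONTASTER_ORDER by `min(preds, key=MUTATIONTASTER_ORDER.index)` (objective: idiomatic); parsing and the assert are unchanged.

-- Shared parsing helper: the two list-comprehension lines that Source A and Source B share verbatim
-- (consequence_elem[1].split(","), upper().strip(), drop "."); also cited by Pre_.
def pvPreds (consequence_elem : List String) : List String :=
  (((PySem.Str.split? ((PySem.List.pyGet? consequence_elem 1).getD "") ",").getD []).map
      (fun x => PySem.Str.strip (PySem.Str.upper x))).filter (fun x => x ≠ ".")

-- ===== PORT A =====
-- the `for i in MUTATIONTASTER_ORDER: if i in mutationtaster_preds: return i` loop; [] = the final assert(False)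
def pvFirstHit (ord preds : List String) : Option String :=
  match ord with
  | [] => none
  | i :: rest => if preds.contains i then some i else pvFirstHit rest preds

def parse_mutationtaster_py (consequence : String) (consequence_elem : List String) (MUTATIONTASTER_ORDER : List String) : Option String :=
  let mutationtaster_preds := pvPreds consequence_elem
  if mutationtaster_preds.length = 0 then none
  else if mutationtaster_preds.all (fun x => MUTATIONTASTER_ORDER.contains x) then
    pvFirstHit MUTATIONTASTER_ORDER mutationtaster_preds
  else none  -- AssertionError: outside Pre_

-- ===== PORT B =====
-- MUTATIONTASTER_ORDER.index(x); exact whenever x ∈ MUTATIONTASTER_ORDER (guaranteed by the assert before min is called)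
def pvRank (ord : List String) (x : String) : Nat :=
  (PySem.List.index? ord x).getD ord.length

def parse_mutationtaster_py_alt (consequence : String) (consequence_elem : List String) (MUTATIONTASTER_ORDER : List String) : Option String :=
  let mutationtaster_preds := pvPreds consequence_elem
  if mutationtaster_preds.isEmpty then none
  else if mutationtaster_preds.all (fun x => MUTATIONTASTER_ORDER.contains x) then
    PySem.List.min? mutationtaster_preds (pvRank MUTATIONTASTER_ORDER)  -- min(preds, key=ORDER.index)
  else none  -- AssertionError: outside Pre_

-- ===== PRECONDITION & SPEC =====
-- Pre_ excludes exactly the inputs on which A raises: IndexError on consequence_elem[1]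
-- (fewer than two elements) and the AssertionError when some parsed prediction is not in
-- MUTATIONTASTER_ORDER; B raises identically there.
def Pre_parse_mutationtaster_py (consequence : String) (consequence_elem : List String) (MUTATIONTASTER_ORDER : List String) : Prop :=
  2 ≤ consequence_elem.length ∧ ∀ x ∈ pvPreds consequence_elem, x ∈ MUTATIONTASTER_ORDER
instance (consequence : String) (consequence_elem : List String) (MUTATIONTASTER_ORDER : List String) : Decidable (Pre_parse_mutationtaster_py consequence consequence_elem MUTATIONTASTER_ORDER) := by unfold Pre_parse_mutationtaster_py; infer_instance

def pvWitness_parse_mutationtaster_py : String × List String × List String :=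
  ("chr1:g.1A>G", ["foo", "deleterious, tolerated"], ["DELETERIOUS", "TOLERATED"])

def Spec_parse_mutationtaster_py (consequence : String) (consequence_elem : List String) (MUTATIONTASTER_ORDER : List String) (out : Option String) : Prop := out = parse_mutationtaster_py_alt consequence consequence_elem MUTATIONTASTER_ORDER
instance (consequence : String) (consequence_elem : List String) (MUTATIONTASTER_ORDER : List String) (out : Option String) : Decidable (Spec_parse_mutationtaster_py consequence consequence_elem MUTATIONTASTER_ORDER out) := by unfold Spec_parse_mutationtaster_py; infer_instance

-- ===== CLAIM (what is proved, stated in full; the proofs are below) =====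
def Claim_equal_parse_mutationtaster_py : Prop := ∀ (consequence : String) (consequence_elem : List String) (MUTATIONTASTER_ORDER : List String), Dom_parse_mutationtaster_py consequence consequence_elem MUTATIONTASTER_ORDER → Pre_parse_mutationtaster_py consequence consequence_elem MUTATIONTASTER_ORDER → Spec_parse_mutationtaster_py consequence consequence_elem MUTATIONTASTER_ORDER (parse_mutationtaster_py consequence consequence_elem MUTATIONTASTER_ORDER)

-- ===== LEMMAS AND PROOFS =====

-- pvRank at the first occurrence of x
theorem pvRank_append_cons_self (pre rest : List String) (x : String) (hx : x ∉ pre) :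
    pvRank (pre ++ x :: rest) x = pre.length := by
  unfold pvRank
  rw [(PySem.List.index?_eq_some_iff (pre ++ x :: rest) x pre.length).2 ⟨pre, rest, rfl, rfl, hx⟩]
  rfl

-- a member not occurring in the prefix has rank at least the prefix length
theorem pvRank_ge_of_not_mem_prefix (pre rest : List String) (x : String)
    (hx : x ∉ pre) (hmem : x ∈ pre ++ rest) : pre.length ≤ pvRank (pre ++ rest) x := by
  obtain ⟨k, hk⟩ := Option.isSome_iff_exists.1 ((PySem.List.index?_isSome_iff _ _).2 hmem)
  obtain ⟨hklt, hget, _⟩ := PySem.List.getElem_of_index?_eq_some hk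
  unfold pvRank
  rw [hk]
  simp only [Option.getD_some]
  by_contra hlt
  push_neg at hlt
  exact hx (hget ▸ (List.getElem_append_left hlt ▸ List.getElem_mem (l := pre) (n := k) hlt))

-- rank is injective on members
theorem pvRank_inj (ord : List String) (x y : String) (hx : x ∈ ord) (hy : y ∈ ord)
    (h : pvRank ord x = pvRank ord y) : x = y := by
  obtain ⟨kx, hkx⟩ := Option.isSome_iff_exists.1 ((PySem.List.index?_isSome_iff _ _).2 hx)
  obtain ⟨ky, hky⟩ := Option.isSome_iff_exists.1 ((PySem.List.index?_isSome_iff _ _).2 hy)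
  obtain ⟨_, hgx, _⟩ := PySem.List.getElem_of_index?_eq_some hkx
  obtain ⟨_, hgy, _⟩ := PySem.List.getElem_of_index?_eq_some hky
  unfold pvRank at h
  rw [hkx, hky] at h
  simp only [Option.getD_some] at h
  subst h
  exact hgx.symm.trans hgy

-- A's scan over ORDER returns a member of preds of minimal rank
theorem pvFirstHit_min (rest : List String) : ∀ (pre preds : List String),
    (∀ x ∈ pre, x ∉ preds) → preds ≠ [] → (∀ x ∈ preds, x ∈ pre ++ rest) →
    ∃ i, pvFirstHit rest preds = some i ∧ i ∈ preds ∧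
      ∀ x ∈ preds, pvRank (pre ++ rest) i ≤ pvRank (pre ++ rest) x := by
  induction rest with
  | nil =>
    intro pre preds hdisj hne hsub
    obtain ⟨p, ps, rfl⟩ := List.exists_cons_of_ne_nil hne
    exact absurd List.mem_cons_self (hdisj p (by simpa using hsub p List.mem_cons_self))
  | cons i rest ih =>
    intro pre preds hdisj hne hsub
    by_cases hm : i ∈ preds
    · refine ⟨i, by simp [pvFirstHit, hm], hm, ?_⟩
      intro x hx
      have hipre : i ∉ pre := fun h => hdisj i h hm
      rw [pvRank_append_cons_self pre rest i hipre]
      exact pvRank_ge_of_not_mem_prefix pre (i :: rest) x (fun h => hdisj x h hx) (hsub x hx)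
    · have hstep : ∀ x ∈ pre ++ [i], x ∉ preds := by
        intro x hx
        rcases List.mem_append.1 hx with h | h
        · exact hdisj x h
        · simpa using (by simpa using h : x = i) ▸ hm
      obtain ⟨j, hj, hjm, hjmin⟩ := ih (pre ++ [i]) preds hstep hne
        (by intro x hx; simpa [List.append_assoc] using hsub x hx)
      refine ⟨j, by simpa [pvFirstHit, hm] using hj, hjm, ?_⟩
      intro x hx
      simpa [List.append_assoc] using hjmin x hx
    
-- ===== VERDICT (by name: the statement is the Claim_ definition above) =====
theorem parse_mutationtaster_py_spec : Claim_equal_parse_mutationtaster_py := by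
  intro consequence ce ord _ hpre
  obtain ⟨_, hsub⟩ := hpre
  unfold Spec_parse_mutationtaster_py parse_mutationtaster_py parse_mutationtaster_py_alt
  simp only [List.isEmpty_iff, ← List.length_eq_zero_iff]
  by_cases hlen : (pvPreds ce).length = 0
  · simp [hlen]
  · have hne : pvPreds ce ≠ [] := by
      intro h; exact hlen (by simp [h])
    have hall : (pvPreds ce).all (fun x => ord.contains x) = true := by
      simp only [List.all_eq_true, List.contains_eq_mem, decide_eq_true_eq]
      exact hsub
    simp only [hlen, if_false, hall, if_true]
    -- A's scan = B's min-by-rank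
    obtain ⟨i, hi, him, himin⟩ := pvFirstHit_min ord [] (pvPreds ce) (by simp) hne
      (by simpa using hsub)
    obtain ⟨m, hm⟩ : ∃ m, PySem.List.min? (pvPreds ce) (pvRank ord) = some m := by
      rcases h : PySem.List.min? (pvPreds ce) (pvRank ord) with _ | m
      · exact absurd ((PySem.List.min?_eq_none_iff _ _).1 h) hne
      · exact ⟨m, rfl⟩
    have hmm := PySem.List.min?_mem hm
    have hmmin := PySem.List.min?_isMin hm
    rw [hi, hm]
    have : i = m := pvRank_inj ord i m (hsub i him) (hsub m hmm)
      (le_antisymm (by simpa using himin m hmm) (hmmin i him))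
    rw [this]
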